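-- pv_equiv track=rewrite | github.com/Talador12/code-music | code_music/theory.py | modulation_path
-- ===== SOURCE A (Python) =====
-- _NOTE_NAMES = ["C", "C#", "D", "Eb", "E", "F", "F#", "G", "Ab", "A", "Bb", "B"]
--
-- _NOTE_TO_SEMI = {n: i for i, n in enumerate(_NOTE_NAMES)}
--
-- def _semi(note: str) -> int:
--     return _NOTE_TO_SEMI[note]
--
-- def modulation_path(
--     key_a: str,
--     key_b: str,
--     mode: str = "major",
-- ) -> list[tuple[str, str]]:
--     """Find the shortest chord path from one key to another.
--
--     Walks through the circle of fifths, collecting chords at each step.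
--     Each adjacent pair of keys shares many pivot chords, so the path
--     stays smooth even for distant modulations.
--
--     Args:
--         key_a: Starting key root.
--         key_b: Target key root.
--         mode:  Mode for both keys.
--
--     Returns:
--         Chord progression that moves from key_a to key_b.
--     """
--     a_semi = _semi(key_a)
--     b_semi = _semi(key_b)
--
--     # Go around circle of fifths (each step = +7 semitones)
--     # or circle of fourths (each step = +5 semitones), whichever shorter
--     fifths_dist = 0
--     s = a_semi
--     while s != b_semi and fifths_dist < 12:
--         s = (s + 7) % 12
--         fifths_dist += 1
--
--     fourths_dist = 0
--     s = a_semi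
--     while s != b_semi and fourths_dist < 12:
--         s = (s + 5) % 12
--         fourths_dist += 1
--
--     step = 7 if fifths_dist <= fourths_dist else 5
--     steps = fifths_dist if step == 7 else fourths_dist
--
--     path: list[tuple[str, str]] = []
--     current = a_semi
--     for _ in range(steps):
--         next_semi = (current + step) % 12
--         next_key = _NOTE_NAMES[next_semi]
--         # Add V-I cadence at each step
--         v_of_next = _NOTE_NAMES[(next_semi + 7) % 12]
--         path.append((v_of_next, "dom7"))
--         path.append((next_key, "maj"))
--         current = next_semi
--
--     return path
-- ===== SOURCE B (Python) =====
-- _NOTE_NAMES = ["C", "C#", "D", "Eb", "E", "F", "F#", "G", "Ab", "A", "Bb", "B"]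
-- _NOTE_TO_SEMI = {n: i for i, n in enumerate(_NOTE_NAMES)}
--
-- def modulation_path(key_a, key_b, mode="major"):
--     a = _NOTE_TO_SEMI[key_a]
--     d = (_NOTE_TO_SEMI[key_b] - a) % 12
--     # 7 and 5 are self-inverse mod 12, so each distance is a closed form of d
--     fifths = (7 * d) % 12
--     fourths = (5 * d) % 12
--     step, steps = (7, fifths) if fifths <= fourths else (5, fourths)
--     path = []
--     for i in range(1, steps + 1):
--         ns = (a + step * i) % 12
--         path += [(_NOTE_NAMES[(ns + 7) % 12], "dom7"), (_NOTE_NAMES[ns], "maj")]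
--     return path
-- ===== Notes on version B (the rewrite author's own statement) =====
-- stated objective: simpler
-- what changed: B replaces A's two bounded while-loops with closed-form modular arithmetic (fifths = 7*d % 12, fourths = 5*d % 12, using that 7 and 5 are self-inverse mod 12) and builds the path by a closed-form index formula (a + step*i) % 12 over range(1, steps+1) instead of threading a 'current' accumulator.
import Mathlib
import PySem

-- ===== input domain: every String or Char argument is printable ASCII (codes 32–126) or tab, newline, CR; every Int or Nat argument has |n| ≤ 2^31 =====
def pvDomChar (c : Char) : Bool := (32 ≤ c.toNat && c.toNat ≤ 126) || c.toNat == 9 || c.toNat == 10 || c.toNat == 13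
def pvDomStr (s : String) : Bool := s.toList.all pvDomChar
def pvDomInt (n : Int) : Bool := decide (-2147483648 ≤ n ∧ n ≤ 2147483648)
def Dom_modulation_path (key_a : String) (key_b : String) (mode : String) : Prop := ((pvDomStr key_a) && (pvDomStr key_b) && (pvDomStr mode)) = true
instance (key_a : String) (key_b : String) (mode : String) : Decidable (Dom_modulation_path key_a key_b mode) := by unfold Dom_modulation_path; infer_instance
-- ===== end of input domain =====

-- B replaces A's two while-loops by closed-form modular arithmetic (7 and 5 are self-inverse mod 12)
-- and builds the path from a closed-form index formula instead of a threaded accumulator; objective: simpler.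

-- ===== PORT A =====
def pvNoteNames : List String := ["C", "C#", "D", "Eb", "E", "F", "F#", "G", "Ab", "A", "Bb", "B"]

def pvNoteToSemi : PySem.Dict String Int :=
  (PySem.List.enumerate pvNoteNames).foldl (fun d p => d.insert p.2 p.1) PySem.Dict.empty

-- _semi: dict lookup; KeyError (missing key) is excluded by Pre_, the default is never used there
def pvSemi (note : String) : Int := (pvNoteToSemi.get? note).getD 0

-- A's while-loop 'while s != b and dist < 12': fuel = 12 - dist, so fuel > 0 ↔ dist < 12
def pvDistLoop (b step : Int) : Int → Int → Nat → Int
  | _, dist, 0 => dist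
  | s, dist, n+1 => if s = b then dist else pvDistLoop b step (PySem.Int.mod (s + step) 12) (dist + 1) n

def modulation_path (key_a : String) (key_b : String) (mode : String) : List (String × String) :=
  let a_semi := pvSemi key_a
  let b_semi := pvSemi key_b
  let fifths_dist := pvDistLoop b_semi 7 a_semi 0 12
  let fourths_dist := pvDistLoop b_semi 5 a_semi 0 12
  let step : Int := if fifths_dist ≤ fourths_dist then 7 else 5
  let steps := if step = 7 then fifths_dist else fourths_dist
  let r := (PySem.List.pyRange 0 steps 1).foldl
    (fun (st : List (String × String) × Int) _ =>
      let next_semi := PySem.Int.mod (st.2 + step) 12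
      let next_key := PySem.List.pyGetD pvNoteNames next_semi ""
      let v_of_next := PySem.List.pyGetD pvNoteNames (PySem.Int.mod (next_semi + 7) 12) ""
      (st.1 ++ [(v_of_next, "dom7"), (next_key, "maj")], next_semi))
    ([], a_semi)
  r.1

-- ===== PORT B =====
def modulation_path_alt (key_a : String) (key_b : String) (mode : String) : List (String × String) :=
  let a := pvSemi key_a
  let d := PySem.Int.mod (pvSemi key_b - a) 12
  let fifths := PySem.Int.mod (7 * d) 12
  let fourths := PySem.Int.mod (5 * d) 12
  let sp : Int × Int := if fifths ≤ fourths then (7, fifths) else (5, fourths)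
  (PySem.List.pyRange 1 (sp.2 + 1) 1).foldl
    (fun path i =>
      let ns := PySem.Int.mod (a + sp.1 * i) 12
      path ++ [(PySem.List.pyGetD pvNoteNames (PySem.Int.mod (ns + 7) 12) "", "dom7"),
               (PySem.List.pyGetD pvNoteNames ns "", "maj")])
    []

-- ===== PRECONDITION & SPEC =====
-- Pre_ excludes exactly the inputs where A raises KeyError (a key root not among the 12 note names).
def Pre_modulation_path (key_a : String) (key_b : String) (mode : String) : Prop :=
  key_a ∈ pvNoteNames ∧ key_b ∈ pvNoteNames
instance (key_a : String) (key_b : String) (mode : String) : Decidable (Pre_modulation_path key_a key_b mode) := by unfold Pre_modulation_path; infer_instance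

def pvWitness_modulation_path : String × String × String := ("C", "A", "major")

def Spec_modulation_path (key_a : String) (key_b : String) (mode : String) (out : List (String × String)) : Prop := out = modulation_path_alt key_a key_b mode
instance (key_a : String) (key_b : String) (mode : String) (out : List (String × String)) : Decidable (Spec_modulation_path key_a key_b mode out) := by unfold Spec_modulation_path; infer_instance

-- ===== CLAIM (what is proved, stated in full; the proofs are below) =====
def Claim_equal_modulation_path : Prop := ∀ (key_a : String) (key_b : String) (mode : String), Dom_modulation_path key_a key_b mode → Pre_modulation_path key_a key_b mode → Spec_modulation_path key_a key_b mode (modulation_path key_a key_b mode)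

-- ===== LEMMAS AND PROOFS =====

-- ===== VERDICT (by name: the statement is the Claim_ definition above) =====
theorem modulation_path_spec : Claim_equal_modulation_path := by
  intro key_a key_b mode _ hpre
  obtain ⟨h1, h2⟩ := hpre
  unfold Spec_modulation_path
  fin_cases h1 <;> fin_cases h2 <;> (simp only [modulation_path, modulation_path_alt]) <;> decide
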